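-- pv_equiv track=rewrite | github.com/ThevinSilva/_sorting_visualizer_ | src/insertion_sort.py | color_array
-- ===== SOURCE A (Python) =====
-- def color_array(data,j,i):
--     arr = []
--     for x in range(len(data)):
--         if x == j:
--             arr.append('green')
--         elif x < i:
--             arr.append('light grey')
--         else:
--             arr.append('red')
--
--     return arr
-- ===== SOURCE B (Python) =====
-- def color_array(data, j, i):
--     n = len(data)
--     left = min(max(i, 0), n)
--     arr = ['light grey'] * left + ['red'] * (n - left)
--     if 0 <= j < n:
--         arr[j] = 'green'
--     return arr
-- ===== Notes on version B (the rewrite author's own statement) =====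
-- stated objective: alternative
-- what changed: Replaces the per-index three-way branch loop with block construction (a clamped grey prefix plus red suffix built by list multiplication) followed by a single in-range green patch.
import Mathlib
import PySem

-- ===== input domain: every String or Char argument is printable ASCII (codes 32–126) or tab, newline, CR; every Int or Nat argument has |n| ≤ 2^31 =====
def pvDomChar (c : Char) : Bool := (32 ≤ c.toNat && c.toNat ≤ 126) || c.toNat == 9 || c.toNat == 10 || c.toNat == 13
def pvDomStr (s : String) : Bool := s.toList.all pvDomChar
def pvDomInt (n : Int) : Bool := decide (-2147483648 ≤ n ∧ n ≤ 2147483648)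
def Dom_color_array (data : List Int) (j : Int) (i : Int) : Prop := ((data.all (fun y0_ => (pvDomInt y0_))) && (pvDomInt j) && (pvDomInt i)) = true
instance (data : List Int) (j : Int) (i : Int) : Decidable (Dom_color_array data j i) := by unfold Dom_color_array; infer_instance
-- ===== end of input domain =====

-- B replaces A's per-index three-way branch loop by block construction (clamped grey prefix
-- ++ red suffix) plus one in-range green patch; same output, different decomposition.


-- ===== PORT A =====
-- for x in range(len(data)): append one of 'green'/'light grey'/'red' per branch
def color_array (data : List Int) (j : Int) (i : Int) : List String :=
  (List.range data.length).foldl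
    (fun arr (x : Nat) =>
      arr ++ [if (x : Int) = j then "green"
              else if (x : Int) < i then "light grey"
              else "red"]) []

-- ===== PORT B =====
def color_array_alt (data : List Int) (j : Int) (i : Int) : List String :=
  let n : Int := data.length
  let left := min (max i 0) n
  let arr := List.replicate left.toNat "light grey" ++ List.replicate (n - left).toNat "red"
  if 0 ≤ j ∧ j < n then arr.set j.toNat "green" else arr

-- ===== PRECONDITION & SPEC =====
def Spec_color_array (data : List Int) (j : Int) (i : Int) (out : List String) : Prop := out = color_array_alt data j i
instance (data : List Int) (j : Int) (i : Int) (out : List String) : Decidable (Spec_color_array data j i out) := by unfold Spec_color_array; infer_instance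

-- ===== CLAIM (what is proved, stated in full; the proofs are below) =====
def Claim_equal_color_array : Prop := ∀ (data : List Int) (j : Int) (i : Int), Dom_color_array data j i → Spec_color_array data j i (color_array data j i)

-- ===== LEMMAS AND PROOFS =====

theorem foldl_append_singleton {α β : Type} (f : α → β) (l : List α) (acc : List β) :
    l.foldl (fun a x => a ++ [f x]) acc = acc ++ l.map f := by
  induction l generalizing acc with
  | nil => simp
  | cons h t ih => simp [List.foldl, ih]

theorem color_array_eq_map (data : List Int) (j i : Int) :
    color_array data j i =
      (List.range data.length).map (fun (x : Nat) =>
        if (x : Int) = j then "green" else if (x : Int) < i then "light grey" else "red") := by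
  rw [color_array, foldl_append_singleton, List.nil_append]

theorem alt_length (data : List Int) (j i : Int) :
    (color_array_alt data j i).length = data.length := by
  simp only [color_array_alt]
  split <;> simp <;> omega

theorem base_getElem (n : Nat) (i : Int) (k : Nat) (hkn : k < n)
    (h : k < (List.replicate (min (max i 0) (n:Int)).toNat "light grey" ++
        List.replicate ((n:Int) - min (max i 0) (n:Int)).toNat "red").length) :
    (List.replicate (min (max i 0) (n:Int)).toNat "light grey" ++
        List.replicate ((n:Int) - min (max i 0) (n:Int)).toNat "red")[k] =
      if (k : Int) < i then "light grey" else "red" := by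
  rcases lt_or_ge (k : Int) i with hlt | hge
  · have hk1 : k < (min (max i 0) (n:Int)).toNat := by omega
    rw [List.getElem_append_left (by simpa using hk1), List.getElem_replicate, if_pos hlt]
  · have hk1 : ¬ k < (min (max i 0) (n:Int)).toNat := by omega
    rw [List.getElem_append_right (by simp; omega), List.getElem_replicate,
      if_neg (by omega)]

-- ===== VERDICT (by name: the statement is the Claim_ definition above) =====
theorem color_array_spec : Claim_equal_color_array := by
  intro data j i _
  show color_array data j i = color_array_alt data j i
  rw [color_array_eq_map]
  apply List.ext_getElem
  · simp [alt_length]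
  · intro k hk hk'
    have hkn : k < data.length := by simpa using hk
    rw [List.getElem_map, List.getElem_range,
      ← List.getD_eq_getElem (color_array_alt data j i) "" hk']
    simp only [color_array_alt]
    by_cases hj : 0 ≤ j ∧ j < (data.length : Int)
    · rw [if_pos hj]
      have hlen : k < ((List.replicate (min (max i 0) (data.length:Int)).toNat "light grey" ++
          List.replicate ((data.length:Int) - min (max i 0) (data.length:Int)).toNat "red").set
            j.toNat "green").length := by simp; omega
      rw [List.getD_eq_getElem _ _ hlen]
      simp only [List.getElem_set]
      by_cases hkj : j.toNat = k
      · have : (k : Int) = j := by omega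
        simp [hkj, this]
      · have hne : ¬ ((k : Int) = j) := by omega
        rw [if_neg hkj, if_neg hne, base_getElem data.length i k hkn (by simp at hlen ⊢; omega)]
    · rw [if_neg hj]
      have hlen : k < (List.replicate (min (max i 0) (data.length:Int)).toNat "light grey" ++
          List.replicate ((data.length:Int) - min (max i 0) (data.length:Int)).toNat "red").length := by
        simp; omega
      have hne : ¬ ((k : Int) = j) := by omega
      rw [List.getD_eq_getElem _ _ hlen, if_neg hne, base_getElem data.length i k hkn hlen]
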